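-- pv_equiv track=rewrite | github.com/akshaali/Code_signal- | Arcade/The core/labyrinth Of nested loop/comfortableNumbers.py | comfortableNumbers
-- ===== SOURCE A (Python) =====
-- import itertools
--
-- def comfortableNumbers(L, R):
--     def is_comfortable(a,b):
--         s = sum(int(d) for d in str(a))
--         return a - s <= b <= a + s
--
--     cnt = 0
--     for a, b in itertools.combinations(range(L, R + 1), 2):
--             if is_comfortable(a, b) and is_comfortable(b, a):
--                 cnt += 1
--
--     return cnt
-- ===== SOURCE B (Python) =====
-- def comfortableNumbers(L, R):
--     def digit_sum(n):
--         return sum(map(int, str(n)))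
--
--     total = 0
--     for b in range(L + 1, R + 1):
--         lo = max(L, b - digit_sum(b))
--         for a in range(lo, b):
--             if a + digit_sum(a) >= b:
--                 total += 1
--     return total
-- ===== Notes on version B (the rewrite author's own statement) =====
-- stated objective: alternative
-- what changed: Instead of testing every pair from itertools.combinations, B loops over each b once and scans only the window [max(L, b - digit_sum(b)), b) of candidate partners a, checking a + digit_sum(a) >= b; the two redundant inequalities of A's pairwise test are dropped since a < b makes them automatic.
import Mathlib
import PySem

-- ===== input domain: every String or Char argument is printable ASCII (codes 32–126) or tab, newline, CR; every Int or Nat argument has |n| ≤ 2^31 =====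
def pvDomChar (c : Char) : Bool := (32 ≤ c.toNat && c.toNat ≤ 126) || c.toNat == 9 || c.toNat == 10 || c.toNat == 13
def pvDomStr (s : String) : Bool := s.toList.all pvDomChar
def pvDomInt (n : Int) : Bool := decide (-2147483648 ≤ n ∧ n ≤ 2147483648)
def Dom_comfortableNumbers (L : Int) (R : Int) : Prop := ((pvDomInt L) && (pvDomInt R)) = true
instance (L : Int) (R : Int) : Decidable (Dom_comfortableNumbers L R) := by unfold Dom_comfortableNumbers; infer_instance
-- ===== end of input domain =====

-- B replaces A's scan of all pairs by a per-b scan of the window [max(L, b-digit_sum(b)), b): a different algorithm with the same counts.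


-- ===== PORT A =====
-- s = sum(int(d) for d in str(a)); '(ofChars? [d]).getD 0' is exact on Pre_ (a ≥ 0, so every char of str(a) is a digit and ofChars? is some)
def pvDigitSumA (n : Int) : Int :=
  (PySem.Int.toChars n).foldl (fun s d => s + ((PySem.Int.ofChars? [d]).getD 0)) 0

def pvIsComfortable (a : Int) (b : Int) : Bool :=
  let s := pvDigitSumA a
  decide (a - s ≤ b ∧ b ≤ a + s)

def comfortableNumbers (L : Int) (R : Int) : Int :=
  (PySem.List.combinations (PySem.List.pyRange L (R + 1) 1) 2).foldl
    (fun cnt p =>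
      match p with
      | [a, b] => if pvIsComfortable a b && pvIsComfortable b a then cnt + 1 else cnt
      | _ => cnt) 0

-- ===== PORT B =====
-- digit_sum(n) = sum(map(int, str(n))); same exactness note as on the A side
def pvDigitSumB (n : Int) : Int :=
  (PySem.Int.toChars n).foldl (fun s d => s + ((PySem.Int.ofChars? [d]).getD 0)) 0

def comfortableNumbers_alt (L : Int) (R : Int) : Int :=
  (PySem.List.pyRange (L + 1) (R + 1) 1).foldl
    (fun total b =>
      let lo := max L (b - pvDigitSumB b)
      (PySem.List.pyRange lo b 1).foldl
        (fun t a => if a + pvDigitSumB a ≥ b then t + 1 else t) total) 0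

-- ===== PRECONDITION & SPEC =====
-- Pre_ excludes exactly the inputs where Python A raises: L < 0 with a nonempty pair range
-- makes int('-') raise ValueError inside is_comfortable.
def Pre_comfortableNumbers (L : Int) (R : Int) : Prop := 0 ≤ L ∨ R ≤ L
instance (L : Int) (R : Int) : Decidable (Pre_comfortableNumbers L R) := by
  unfold Pre_comfortableNumbers; infer_instance

def pvWitness_comfortableNumbers : Int × Int := (0, 12)

def Spec_comfortableNumbers (L : Int) (R : Int) (out : Int) : Prop := out = comfortableNumbers_alt L R
instance (L : Int) (R : Int) (out : Int) : Decidable (Spec_comfortableNumbers L R out) := by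
  unfold Spec_comfortableNumbers; infer_instance

-- ===== CLAIM (what is proved, stated in full; the proofs are below) =====
def Claim_equal_comfortableNumbers : Prop := ∀ (L : Int) (R : Int), Dom_comfortableNumbers L R → Pre_comfortableNumbers L R → Spec_comfortableNumbers L R (comfortableNumbers L R)

-- ===== LEMMAS AND PROOFS =====

-- the reduced pair predicate both sides count (a < b assumed): b ≤ a + s(a) ∧ b - s(b) ≤ a
def pvPred (a : Int) (b : Int) : Bool := decide (b ≤ a + pvDigitSumA a ∧ b - pvDigitSumA b ≤ a)

-- the triangular count, a-major (mirrors A's combinations order)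
def pvCnt2 (f : Int → Int → Bool) : List Int → Int
  | [] => 0
  | x :: xs => (xs.countP (f x) : Int) + pvCnt2 f xs

-- the triangular count, b-major (mirrors B's loop order)
def pvSB (f : Int → Int → Bool) (L : Int) (N : Int) : Int :=
  ((PySem.List.pyRange (L + 1) N 1).map
    (fun b => ((PySem.List.pyRange L b 1).countP (fun a => f a b) : Int))).sum

theorem pvA_fold (f : Int → Int → Bool) :
    ∀ (xs : List Int) (c : Int),
      (PySem.List.combinations xs 2).foldl
        (fun cnt p =>
          match p with
          | [a, b] => if f a b then cnt + 1 else cnt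
          | _ => cnt) c = c + pvCnt2 f xs := by
  intro xs
  induction xs with
  | nil => intro c; simp [PySem.List.combinations_nil_succ, pvCnt2]
  | cons x xs ih =>
    intro c
    rw [show (2:Nat) = 1 + 1 from rfl, PySem.List.combinations_cons_succ,
        PySem.List.combinations_one, List.map_map, List.foldl_append, List.foldl_map]
    simp only [Function.comp]
    rw [PySem.List.foldl_count_if (fun y => f x y) xs c]
    rw [show (1+1:Nat) = 2 from rfl, ih]
    simp [pvCnt2]
    ring

theorem pvCnt2_eq_pvSB (f : Int → Int → Bool) :
    ∀ (n : Nat) (L N : Int), N - L = (n : Int) →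
      pvCnt2 f (PySem.List.pyRange L N 1) = pvSB f L N := by
  intro n
  induction n with
  | zero =>
    intro L N h
    rw [PySem.List.pyRange_one_eq_nil (by omega), pvSB,
        PySem.List.pyRange_one_eq_nil (by omega)]
    simp [pvCnt2]
  | succ n ih =>
    intro L N h
    have hLN : L < N := by omega
    have hmap : (PySem.List.pyRange (L + 1) N 1).map
        (fun b => ((PySem.List.pyRange L b 1).countP (fun a => f a b) : Int))
      = (PySem.List.pyRange (L + 1) N 1).map
        (fun b => (if f L b then (1:Int) else 0)
          + ((PySem.List.pyRange (L+1) b 1).countP (fun a => f a b) : Int)) := by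
      apply List.map_congr_left
      intro b hb
      rw [PySem.List.mem_pyRange_one] at hb
      rw [PySem.List.pyRange_one_cons (by omega : L < b), List.countP_cons]
      push_cast
      ring
    have htail : ((PySem.List.pyRange (L + 1) N 1).map
        (fun b => ((PySem.List.pyRange (L+1) b 1).countP (fun a => f a b) : Int))).sum
        = pvSB f (L+1) N := by
      rw [pvSB]
      by_cases hc : L + 1 < N
      · rw [PySem.List.pyRange_one_cons hc, List.map_cons, List.sum_cons,
            PySem.List.pyRange_one_eq_nil (by omega : (L+1:Int) ≤ L+1)]
        simp
      · rw [PySem.List.pyRange_one_eq_nil (by omega), PySem.List.pyRange_one_eq_nil (by omega)]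
    have hR : pvSB f L N = (List.countP (f L) (PySem.List.pyRange (L+1) N 1) : Int)
        + pvSB f (L+1) N := by
      rw [pvSB, hmap, PySem.List.sum_map_add_int, PySem.List.sum_map_ite_one_zero, htail]
    rw [PySem.List.pyRange_one_cons hLN]
    show (List.countP (f L) (PySem.List.pyRange (L+1) N 1) : Int)
        + pvCnt2 f (PySem.List.pyRange (L+1) N 1) = _
    rw [ih (L+1) N (by omega), hR]

theorem pvPair_reduce (a b : Int) (h : a < b) :
    (pvIsComfortable a b && pvIsComfortable b a) = pvPred a b := by
  rw [Bool.eq_iff_iff]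
  simp only [pvIsComfortable, pvPred, Bool.and_eq_true, decide_eq_true_eq]
  constructor
  · rintro ⟨⟨h1, h2⟩, ⟨h3, h4⟩⟩; exact ⟨h2, h3⟩
  · rintro ⟨h2, h3⟩; exact ⟨⟨by omega, h2⟩, ⟨h3, by omega⟩⟩

theorem pvDS_eq : pvDigitSumB = pvDigitSumA := rfl

theorem pvWindow (L b : Int) (h : L < b) :
    (List.countP (fun a => decide (a + pvDigitSumB a ≥ b))
        (PySem.List.pyRange (max L (b - pvDigitSumB b)) b 1) : Int)
      = (List.countP (fun a => pvPred a b) (PySem.List.pyRange L b 1) : Int) := by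
  rw [pvDS_eq]
  by_cases hs : 0 ≤ pvDigitSumA b
  · have hLm : L ≤ max L (b - pvDigitSumA b) := le_max_left _ _
    have hmb : max L (b - pvDigitSumA b) ≤ b := by
      apply max_le (le_of_lt h) (by omega)
    rw [PySem.List.pyRange_one_append L (max L (b - pvDigitSumA b)) b hLm hmb,
        List.countP_append]
    have hleft : List.countP (fun a => pvPred a b)
        (PySem.List.pyRange L (max L (b - pvDigitSumA b)) 1) = 0 := by
      rw [List.countP_eq_zero]
      intro a ha
      rw [PySem.List.mem_pyRange_one] at ha
      simp only [pvPred, decide_eq_true_eq]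
      intro hp
      omega
    have hright : List.countP (fun a => pvPred a b)
        (PySem.List.pyRange (max L (b - pvDigitSumA b)) b 1)
        = List.countP (fun a => decide (a + pvDigitSumA a ≥ b))
            (PySem.List.pyRange (max L (b - pvDigitSumA b)) b 1) := by
      apply List.countP_congr
      intro a ha
      rw [PySem.List.mem_pyRange_one] at ha
      simp only [pvPred, decide_eq_true_eq]
      constructor
      · rintro ⟨h1, _⟩; omega
      · intro h1; constructor <;> omega
    rw [hleft, hright]
    simp
  · have h1 : PySem.List.pyRange (max L (b - pvDigitSumA b)) b 1 = [] := by
      apply PySem.List.pyRange_one_eq_nil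
      have : b < b - pvDigitSumA b := by omega
      exact le_max_of_le_right (by omega)
    have h2 : List.countP (fun a => pvPred a b) (PySem.List.pyRange L b 1) = 0 := by
      rw [List.countP_eq_zero]
      intro a ha
      rw [PySem.List.mem_pyRange_one] at ha
      simp only [pvPred, decide_eq_true_eq]
      intro hp
      omega
    rw [h1, h2]
    simp

theorem pvB_eq (L R : Int) : comfortableNumbers_alt L R = pvSB pvPred L (R + 1) := by
  have hinner : ∀ (b c : Int),
      (PySem.List.pyRange (max L (b - pvDigitSumB b)) b 1).foldl
        (fun t a => if a + pvDigitSumB a ≥ b then t + 1 else t) c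
      = c + (List.countP (fun a => decide (a + pvDigitSumB a ≥ b))
          (PySem.List.pyRange (max L (b - pvDigitSumB b)) b 1) : Int) := by
    intro b c
    have := PySem.List.foldl_count_if (fun a => decide (a + pvDigitSumB a ≥ b))
      (PySem.List.pyRange (max L (b - pvDigitSumB b)) b 1) c
    simpa using this
  rw [comfortableNumbers_alt]
  simp only [hinner]
  rw [PySem.List.foldl_add]
  rw [pvSB, zero_add]
  congr 1
  apply List.map_congr_left
  intro b hb
  rw [PySem.List.mem_pyRange_one] at hb
  exact pvWindow L b (by omega)

theorem pvA_eq (L R : Int) : comfortableNumbers L R = pvSB pvPred L (R + 1) := by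
  rw [comfortableNumbers, pvA_fold, zero_add]
  have hcnt : pvCnt2 (fun a b => pvIsComfortable a b && pvIsComfortable b a)
      (PySem.List.pyRange L (R + 1) 1) = pvCnt2 pvPred (PySem.List.pyRange L (R + 1) 1) := by
    have key : ∀ (n : Nat) (M : Int), (R + 1) - M = (n : Int) →
        pvCnt2 (fun a b => pvIsComfortable a b && pvIsComfortable b a)
          (PySem.List.pyRange M (R + 1) 1) = pvCnt2 pvPred (PySem.List.pyRange M (R + 1) 1) := by
      intro n
      induction n with
      | zero => intro M h; rw [PySem.List.pyRange_one_eq_nil (by omega)]; rfl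
      | succ n ih =>
        intro M h
        rw [PySem.List.pyRange_one_cons (by omega : M < R + 1)]
        show (List.countP _ _ : Int) + _ = (List.countP _ _ : Int) + _
        rw [ih (M + 1) (by omega)]
        congr 2
        apply List.countP_congr
        intro b hb
        rw [PySem.List.mem_pyRange_one] at hb
        simp only []
        rw [pvPair_reduce M b (by omega)]
    by_cases hc : R + 1 ≤ L
    · rw [PySem.List.pyRange_one_eq_nil hc]; rfl
    · exact key (R + 1 - L).toNat L (by omega)
  rw [hcnt]
  by_cases hc : R + 1 ≤ L
  · rw [PySem.List.pyRange_one_eq_nil hc, pvSB, PySem.List.pyRange_one_eq_nil (by omega)]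
    rfl
  · exact pvCnt2_eq_pvSB pvPred (R + 1 - L).toNat L (R + 1) (by omega)

-- ===== VERDICT (by name: the statement is the Claim_ definition above) =====
theorem comfortableNumbers_spec : Claim_equal_comfortableNumbers := by
  intro L R _ _
  unfold Spec_comfortableNumbers
  rw [pvA_eq, pvB_eq]
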